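-- pv_equiv track=rewrite | github.com/davidbelfiori/Foi | eserciziesame/ricorsione.py | seleziona
-- ===== SOURCE A (Python) =====
-- def seleziona(L,n):
--     if len(L)==0:
--         return []
--     elif len(L)==1:
--         return L
--     else:
--         if L[1]==n:
--             return seleziona(L[1:],n)
--         if not L[1]==n:
--             return [L[0]] + seleziona(L[1:],n)
-- ===== SOURCE B (Python) =====
-- def seleziona(L, n):
--     # single linear pass: keep each element whose successor != n; the last element is always kept
--     return [x for x, y in zip(L, L[1:]) if y != n] + L[-1:]
-- ===== Notes on version B (the rewrite author's own statement) =====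
-- stated objective: faster
-- what changed: Replaced the recursion with O(n) list slicing per step by a single linear zip-with-successor pass (keep x iff its successor differs from n, always keep the last element).
import Mathlib
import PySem

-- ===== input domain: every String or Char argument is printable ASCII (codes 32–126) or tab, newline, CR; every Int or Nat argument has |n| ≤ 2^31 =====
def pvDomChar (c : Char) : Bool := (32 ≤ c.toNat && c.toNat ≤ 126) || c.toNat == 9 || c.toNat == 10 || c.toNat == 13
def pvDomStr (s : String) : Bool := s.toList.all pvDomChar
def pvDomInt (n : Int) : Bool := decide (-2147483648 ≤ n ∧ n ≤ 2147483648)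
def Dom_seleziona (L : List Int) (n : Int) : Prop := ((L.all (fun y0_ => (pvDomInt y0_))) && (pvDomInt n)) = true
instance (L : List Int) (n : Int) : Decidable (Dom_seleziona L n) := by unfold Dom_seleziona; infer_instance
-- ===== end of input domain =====

-- B replaces A's O(n^2) slicing recursion by a single linear zip-with-successor pass (faster, asymptotic).


-- ===== PORT A =====
def seleziona (L : List Int) (n : Int) : List Int :=
  match L with
  | [] => []
  | [x] => [x]
  | x :: y :: rest =>
      if y == n then seleziona (y :: rest) n
      else x :: seleziona (y :: rest) n

-- ===== PORT B =====
def seleziona_alt (L : List Int) (n : Int) : List Int :=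
  ((L.zip (PySem.List.slice L (some 1) none)).filter (fun p => p.2 != n)).map Prod.fst
    ++ PySem.List.slice L (some (-1)) none

-- ===== PRECONDITION & SPEC =====
def Spec_seleziona (L : List Int) (n : Int) (out : List Int) : Prop := out = seleziona_alt L n
instance (L : List Int) (n : Int) (out : List Int) : Decidable (Spec_seleziona L n out) := by unfold Spec_seleziona; infer_instance

-- ===== CLAIM (what is proved, stated in full; the proofs are below) =====
def Claim_equal_seleziona : Prop := ∀ (L : List Int) (n : Int), Dom_seleziona L n → Spec_seleziona L n (seleziona L n)

-- ===== LEMMAS AND PROOFS =====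
lemma seleziona_eq_alt (n : Int) :
    ∀ L : List Int, seleziona L n =
      ((L.zip L.tail).filter (fun p => p.2 != n)).map Prod.fst ++ L.drop (L.length - 1)
  | [] => by simp [seleziona]
  | [x] => by simp [seleziona]
  | x :: y :: rest => by
      have ih := seleziona_eq_alt n (y :: rest)
      simp only [seleziona, List.tail_cons, List.zip_cons_cons, List.filter_cons,
        List.length_cons, Nat.add_sub_cancel, List.drop_succ_cons] at *
      by_cases h : y = n
      · subst h; simpa using ih
      · simp [h, ih]

-- ===== VERDICT (by name: the statement is the Claim_ definition above) =====
theorem seleziona_spec : Claim_equal_seleziona := by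
  intro L n _
  unfold Spec_seleziona seleziona_alt
  rw [PySem.List.slice_from_one, PySem.List.slice_from_neg_one, seleziona_eq_alt]
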